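-- pv_equiv track=rewrite | github.com/posl/comment_recommendation | script/mod_gen/4_time/zh/216_C/7.py | solve
-- ===== SOURCE A (Python) =====
-- def solve(n):
--     if n == 1:
--         return 'A'
--     elif n == 2:
--         return 'B'
--     elif n % 2 == 0:
--         return solve(n // 2) + 'B'
--     else:
--         return solve(n - 1) + 'A'
-- ===== SOURCE B (Python) =====
-- def solve(n):
--     cs = []
--     while n not in (1, 2):
--         if n % 2 == 0:
--             cs.append('B')
--             n //= 2
--         else:
--             cs.append('A')
--             n -= 1
--     base = 'A' if n == 1 else 'B'
--     return base + ''.join(reversed(cs))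
-- ===== Notes on version B (the rewrite author's own statement) =====
-- stated objective: simpler
-- what changed: Replaces the recursion (which builds the string by prefix concatenation on the way back up) with a single iterative loop that collects the step characters in a list and joins them reversed after the terminal base character.
-- outside the precondition, e.g. on solve(0): A raises RecursionError, B does not finish within the time limit
import Mathlib
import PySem

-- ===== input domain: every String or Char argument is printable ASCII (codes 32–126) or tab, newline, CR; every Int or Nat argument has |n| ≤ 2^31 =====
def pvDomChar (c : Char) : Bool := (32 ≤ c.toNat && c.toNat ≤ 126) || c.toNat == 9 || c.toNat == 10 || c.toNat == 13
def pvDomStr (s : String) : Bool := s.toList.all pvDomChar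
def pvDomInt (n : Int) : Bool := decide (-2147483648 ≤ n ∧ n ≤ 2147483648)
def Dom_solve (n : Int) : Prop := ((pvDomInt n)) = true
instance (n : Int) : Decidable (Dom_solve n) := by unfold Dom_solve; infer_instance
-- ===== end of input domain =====

-- B replaces A's recursion by one iterative loop collecting step characters, joined reversed after the base character (objective: simpler).
-- ===== PORT A =====
-- fuel-based transcription of A's recursion; fuel n.toNat + 1 suffices on Pre_ (each step decreases n by at least 1)
def solveFuel : Nat → Int → String
  | 0, _ => ""
  | f + 1, n =>
    if n = 1 then "A"
    else if n = 2 then "B"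
    else if PySem.Int.mod n 2 = 0 then solveFuel f (PySem.Int.floordiv n 2) ++ "B"
    else solveFuel f (n - 1) ++ "A"

def solve (n : Int) : String := solveFuel (n.toNat + 1) n

-- ===== PORT B =====
-- the while loop: returns (collected chars, final n)
def solveLoop : Nat → Int → List Char → List Char × Int
  | 0, n, cs => (cs, n)
  | f + 1, n, cs =>
    if n ≠ 1 ∧ n ≠ 2 then
      if PySem.Int.mod n 2 = 0 then solveLoop f (PySem.Int.floordiv n 2) (cs ++ ['B'])
      else solveLoop f (n - 1) (cs ++ ['A'])
    else (cs, n)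

def solve_alt (n : Int) : String :=
  let r := solveLoop (n.toNat + 1) n []
  (if r.2 = 1 then "A" else "B") ++ String.ofList r.1.reverse

-- ===== PRECONDITION & SPEC =====
-- Pre_ excludes n ≤ 0, where A recurses forever (RecursionError) and B loops forever.
def Pre_solve (n : Int) : Prop := 1 ≤ n
instance (n : Int) : Decidable (Pre_solve n) := by unfold Pre_solve; infer_instance
def pvWitness_solve : Int := 7
def Spec_solve (n : Int) (out : String) : Prop := out = solve_alt n
instance (n : Int) (out : String) : Decidable (Spec_solve n out) := by unfold Spec_solve; infer_instance

-- ===== CLAIM (what is proved, stated in full; the proofs are below) =====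
def Claim_equal_solve : Prop := ∀ (n : Int), Dom_solve n → Pre_solve n → Spec_solve n (solve n)

-- ===== LEMMAS AND PROOFS =====

theorem pv_ofList_B (l : List Char) : String.ofList ('B' :: l) = "B" ++ String.ofList l := by
  apply String.toList_injective; simp

theorem pv_ofList_A (l : List Char) : String.ofList ('A' :: l) = "A" ++ String.ofList l := by
  apply String.toList_injective; simp



-- key invariant: running the loop from (n, cs) yields A's value for n, prefixed-reversed with cs
theorem loop_eq (f : Nat) (n : Int) (cs : List Char) (h1 : 1 ≤ n) (hf : n.toNat ≤ f) :
    (if (solveLoop f n cs).2 = 1 then "A" else "B") ++ String.ofList (solveLoop f n cs).1.reverse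
      = solveFuel f n ++ String.ofList cs.reverse := by
  induction f generalizing n cs with
  | zero => omega
  | succ f ih =>
    by_cases h1' : n = 1
    · subst h1'; simp [solveLoop, solveFuel]
    · by_cases h2 : n = 2
      · subst h2; simp [solveLoop, solveFuel]
      · by_cases he : PySem.Int.mod n 2 = 0
        · have hd : PySem.Int.floordiv n 2 = n / 2 :=
            PySem.Int.floordiv_eq_ediv_of_pos (by omega)
          have h3 : 3 ≤ n := by omega
          have hrec : 1 ≤ PySem.Int.floordiv n 2 := by rw [hd]; omega
          have hfr : (PySem.Int.floordiv n 2).toNat ≤ f := by rw [hd]; omega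
          simp only [solveLoop, solveFuel, if_pos (And.intro h1' h2), if_neg h1', if_neg h2,
            if_pos he]
          rw [ih _ _ hrec hfr]
          simp [pv_ofList_B, String.append_assoc]
        · have h3 : 3 ≤ n := by
            rcases lt_or_ge n 3 with h | h
            · interval_cases n <;> simp_all
            · exact h
          have hrec : 1 ≤ n - 1 := by omega
          have hfr : (n - 1).toNat ≤ f := by omega
          simp only [solveLoop, solveFuel, if_pos (And.intro h1' h2), if_neg h1', if_neg h2,
            if_neg he]
          rw [ih _ _ hrec hfr]
          simp [pv_ofList_A, String.append_assoc]

-- ===== VERDICT (by name: the statement is the Claim_ definition above) =====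
theorem solve_spec : Claim_equal_solve := by
  intro n _ hpre
  unfold Spec_solve solve solve_alt
  have := loop_eq (n.toNat + 1) n [] hpre (by omega)
  simp only [List.reverse_nil] at this
  rw [this]
  apply String.toList_injective; simp
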